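-- pv_equiv track=rewrite | github.com/ytatus94/Leetcode | python3/2439_Minimize_Maximum_of_Array.py | minimizeArrayValue
-- ===== SOURCE A (Python) =====
-- from typing import List
--
-- def minimizeArrayValue(nums: List[int]) -> int:
--     if nums is None or len(nums) == 0:
--         return 0
--
--     # 把 nums[i] 某部分的數值，搬到 nums[i - 1]
--     # 這樣一直搬的話， nums[0] 的數值會越來越大，要找出一個最小的 nums[0]
--     # 所以答案一定是介於 nums[0] 和 max(nums) 之間的某個數 k
--     # 用二分法找出這個 k 值
--
--     start = nums[0]
--     end = max(nums)
--
--     while start < end: # 這邊不能寫 start + 1 < end 這樣離開回圈時 start = end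
--         mid = start + (end - start) // 2 # 就是某個數 k
--         space = 0 # nums[i] 和 k 之間有多少空間，可以容納來自後面搬過來的數值
--         flag = True # 判斷空間夠不夠
--         for i in range(len(nums)):
--             if nums[i] < mid: # 有空間 mid - nums[i] 可以容納來自後面的數值
--                 space += mid - nums[i]
--             else:
--                 space -= nums[i] - mid # nums[i] 比 mid 大的時候，會把數值往前面搬，因此佔用了可用空間
--
--             if space < 0: # 可用空間都被用光了，所以無法再搬動
--                 flag = False
--                 break
--
--         if flag: # 目前找到的 mid 是 nums[0] 最大值的其中一個可能值，但是可能會有更小的值，答案一定在 start ~ mid 之間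
--             end = mid
--         else: # 目前找到的 mid 沒辦法使 nums[0] 容納後面搬過來的數，所以答案一定在 mid ~ end 之間
--             start = mid + 1
--
--     # 離開迴圈時就是找到了，此時 start = end 就是答案
--
--     return end
-- ===== SOURCE B (Python) =====
-- from typing import List
--
-- def minimizeArrayValue(nums: List[int]) -> int:
--     # single pass: answer = max over prefixes of ceil(prefix_sum / prefix_len)
--     if not nums:
--         return 0
--     ans = nums[0]
--     s = 0
--     for i, x in enumerate(nums):
--         s += x
--         c = -((-s) // (i + 1))
--         if c > ans:
--             ans = c
--     return ans
-- ===== Notes on version B (the rewrite author's own statement) =====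
-- stated objective: faster
-- what changed: Replaced binary search over the answer range (each probe rescanning the whole array) by a single prefix-sum pass returning max over i of ceil(prefix_i/(i+1)).
import Mathlib
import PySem

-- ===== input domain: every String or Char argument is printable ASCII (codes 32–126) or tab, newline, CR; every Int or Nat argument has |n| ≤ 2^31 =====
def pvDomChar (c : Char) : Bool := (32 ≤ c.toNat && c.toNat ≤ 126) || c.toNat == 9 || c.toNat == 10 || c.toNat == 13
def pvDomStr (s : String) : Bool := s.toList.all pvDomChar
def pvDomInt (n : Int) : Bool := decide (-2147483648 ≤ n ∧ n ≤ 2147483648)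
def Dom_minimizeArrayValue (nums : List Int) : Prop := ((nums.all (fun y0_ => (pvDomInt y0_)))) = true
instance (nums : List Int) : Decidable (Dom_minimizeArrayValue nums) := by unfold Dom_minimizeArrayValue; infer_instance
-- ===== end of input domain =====

-- B replaces A's binary search (each probe rescanning the array) by one prefix-sum pass
-- taking the max of ceil(prefix/(len of prefix)); proved to return the same value on all inputs.

-- ===== PORT A =====
-- the inner `for i in range(len(nums))` feasibility scan of A, with its `space` accumulator and break
def pvCheckA (mid : Int) : List Int → Int → Bool
  | [], _ => true
  | x :: xs, space =>
    let space' := if x < mid then space + (mid - x) else space - (x - mid)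
    if space' < 0 then false else pvCheckA mid xs space'

-- the `while start < end` binary-search loop of A (fuel = enough iterations, strictly
-- more than the interval width, which shrinks each step; it only guards termination)
def pvBSearch : Nat → List Int → Int → Int → Int
  | 0, _, _, stop => stop
  | fuel + 1, nums, start, stop =>
    if start < stop then
      let mid := start + PySem.Int.floordiv (stop - start) 2
      if pvCheckA mid nums 0 then pvBSearch fuel nums start mid
      else pvBSearch fuel nums (mid + 1) stop
    else stop

def minimizeArrayValue (nums : List Int) : Int :=
  match nums with
  | [] => 0
  | x :: xs =>
    let start := x
    let stop := (PySem.List.max? (x :: xs) (fun y => y)).getD 0  -- max(nums); nonempty, so getD never defaults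
    pvBSearch ((stop - start).toNat + 1) (x :: xs) start stop

-- ===== PORT B =====
-- Source B's loop: running prefix sum s, running answer ans, index i
def pvAltLoop : List Int → Nat → Int → Int → Int
  | [], _, _, ans => ans
  | x :: xs, i, s, ans =>
    let s' := s + x
    let c := -(PySem.Int.floordiv (-s') ((i : Int) + 1))
    pvAltLoop xs (i + 1) s' (if c > ans then c else ans)

def minimizeArrayValue_alt (nums : List Int) : Int :=
  match nums with
  | [] => 0
  | x :: _ => pvAltLoop nums 0 0 x

-- ===== PRECONDITION & SPEC =====
def Spec_minimizeArrayValue (nums : List Int) (out : Int) : Prop := out = minimizeArrayValue_alt nums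
instance (nums : List Int) (out : Int) : Decidable (Spec_minimizeArrayValue nums out) := by unfold Spec_minimizeArrayValue; infer_instance

-- ===== CLAIM (what is proved, stated in full; the proofs are below) =====
def Claim_equal_minimizeArrayValue : Prop := ∀ (nums : List Int), Dom_minimizeArrayValue nums → Spec_minimizeArrayValue nums (minimizeArrayValue nums)

-- ===== LEMMAS AND PROOFS =====

theorem pvCheckA_iff (mid : Int) (xs : List Int) (space : Int) :
    pvCheckA mid xs space = true ↔
      ∀ k : Nat, k < xs.length → ((xs.take (k + 1)).sum ≤ mid * ((k : Int) + 1) + space) := by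
  induction xs generalizing space with
  | nil => simp [pvCheckA]
  | cons x xs ih =>
    have hsp : (if x < mid then space + (mid - x) else space - (x - mid)) = space + mid - x := by
      split_ifs <;> ring
    rw [pvCheckA, hsp]
    by_cases hneg : space + mid - x < 0
    · simp only [if_pos hneg]
      constructor
      · intro h; exact absurd h (by simp)
      · intro h
        have h0 := h 0 (by simp)
        simp at h0
        omega
    · simp only [if_neg hneg]
      rw [ih]
      constructor
      · intro h k hk
        cases k with
        | zero => simp; omega
        | succ j =>
          have hj := h j (by simpa using hk)
          have : mid * ((j : Int) + 1 + 1) = mid * ((j : Int) + 1) + mid := by ring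
          simp [List.take_succ_cons] at hj ⊢
          omega
      · intro h j hj
        have hk := h (j + 1) (by simpa using hj)
        have : mid * ((j : Int) + 1 + 1) = mid * ((j : Int) + 1) + mid := by ring
        simp [List.take_succ_cons] at hk ⊢
        omega

theorem pvAltLoop_le_iff (xs : List Int) (i : Nat) (s ans m : Int) :
    pvAltLoop xs i s ans ≤ m ↔
      ans ≤ m ∧ ∀ k : Nat, k < xs.length →
        s + (xs.take (k + 1)).sum ≤ m * ((i : Int) + (k : Int) + 1) := by
  induction xs generalizing i s ans with
  | nil => simp [pvAltLoop]
  | cons x xs ih =>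
    rw [pvAltLoop]
    rw [ih]
    have hc : (-(PySem.Int.floordiv (-(s + x)) ((i : Int) + 1)) ≤ m) ↔ s + x ≤ m * ((i : Int) + 1) := by
      have hpos : (0 : Int) < (i : Int) + 1 := by positivity
      rw [neg_le, PySem.Int.le_floordiv_iff_mul_le hpos]
      constructor <;> intro h <;> nlinarith
    constructor
    · rintro ⟨h1, h2⟩
      have hans : ans ≤ m ∧ s + x ≤ m * ((i : Int) + 1) := by
        by_cases hgt : -(PySem.Int.floordiv (-(s + x)) ((i : Int) + 1)) > ans
        · simp only [if_pos hgt] at h1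
          exact ⟨le_trans (le_of_lt hgt) h1, hc.mp h1⟩
        · simp only [if_neg hgt] at h1
          exact ⟨h1, hc.mp (le_trans (not_lt.mp hgt) h1)⟩
      refine ⟨hans.1, ?_⟩
      intro k hk
      cases k with
      | zero => simpa using hans.2
      | succ j =>
        have hj := h2 j (by simpa using hk)
        have : m * ((i : Int) + ((j : Int) + 1) + 1) = m * (((i : Int) + 1) + (j : Int) + 1) := by ring
        simp [List.take_succ_cons] at hj ⊢
        omega
    · rintro ⟨h1, h2⟩
      have h0 : s + x ≤ m * ((i : Int) + 1) := by simpa using h2 0 (by simp)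
      refine ⟨?_, ?_⟩
      · split_ifs with hgt
        · exact hc.mpr h0
        · exact h1
      · intro j hj
        have hk := h2 (j + 1) (by simpa using hj)
        have : m * ((i : Int) + ((j : Int) + 1) + 1) = m * (((i : Int) + 1) + (j : Int) + 1) := by ring
        simp [List.take_succ_cons] at hk ⊢
        omega

-- key characterisation: A's feasibility check holds at m exactly when B's answer is ≤ m
theorem pvKey (x : Int) (xs : List Int) (m : Int) :
    pvCheckA m (x :: xs) 0 = true ↔ pvAltLoop (x :: xs) 0 0 x ≤ m := by
  rw [pvCheckA_iff, pvAltLoop_le_iff]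
  constructor
  · intro h
    refine ⟨by simpa using h 0 (by simp), ?_⟩
    intro k hk
    have := h k hk
    simp at this ⊢
    omega
  · rintro ⟨-, h⟩ k hk
    have := h k hk
    simp at this ⊢
    omega

theorem pvBSearch_eq (nums : List Int) (A : Int)
    (hkey : ∀ m : Int, pvCheckA m nums 0 = true ↔ A ≤ m) :
    ∀ fuel : Nat, ∀ s e : Int, (e - s).toNat < fuel → s ≤ A → A ≤ e →
      pvBSearch fuel nums s e = A := by
  intro fuel
  induction fuel with
  | zero => intro s e h; omega
  | succ n ih =>
    intro s e hn hs he
    rw [pvBSearch]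
    by_cases hse : s < e
    · simp only [if_pos hse]
      have hd := PySem.Int.floordiv_eq_ediv_of_pos (a := e - s) (b := 2) (by omega)
      set mid := s + PySem.Int.floordiv (e - s) 2 with hmid
      have hb1 : s ≤ mid := by omega
      have hb2 : mid < e := by omega
      by_cases hch : pvCheckA mid nums 0 = true
      · simp only [if_pos hch]
        exact ih s mid (by omega) hs ((hkey mid).mp hch)
      · simp only [if_neg hch]
        have : ¬ A ≤ mid := fun h => hch ((hkey mid).mpr h)
        exact ih (mid + 1) e (by omega) (by omega) he
    · simp only [if_neg hse]
      omega

theorem pvStop_feasible (x : Int) (xs : List Int) :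
    pvCheckA (xs.foldl max x) (x :: xs) 0 = true := by
  rw [pvCheckA_iff]
  intro k hk
  set M := xs.foldl max x with hM
  have hmem : ∀ y ∈ (x :: xs).take (k + 1), y ≤ M := by
    intro y hy
    have hy' : y ∈ x :: xs := List.mem_of_mem_take hy
    have hmax := PySem.List.le_foldl_max xs x
    rcases List.mem_cons.mp hy' with h | h
    · simpa [h] using hmax.1
    · exact hmax.2 y h
  have hlen : ((x :: xs).take (k + 1)).length = k + 1 := by
    simp only [List.length_cons] at hk
    simp
    omega
  have hsum := List.sum_le_card_nsmul ((x :: xs).take (k + 1)) M hmem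
  rw [hlen] at hsum
  have : (k + 1) • M = ((k : Int) + 1) * M := by
    push_cast [nsmul_eq_mul]
    ring
  rw [this] at hsum
  nlinarith [hsum]

-- ===== VERDICT (by name: the statement is the Claim_ definition above) =====
theorem minimizeArrayValue_spec : Claim_equal_minimizeArrayValue := by
  intro nums _
  unfold Spec_minimizeArrayValue
  match nums with
  | [] => rfl
  | x :: xs =>
    show pvBSearch ((((PySem.List.max? (x :: xs) (fun y => y)).getD 0) - x).toNat + 1)
        (x :: xs) x ((PySem.List.max? (x :: xs) (fun y => y)).getD 0) =
      pvAltLoop (x :: xs) 0 0 x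
    rw [PySem.List.max?_id_cons, Option.getD_some]
    set A := pvAltLoop (x :: xs) 0 0 x with hA
    have hlo : x ≤ A := ((pvAltLoop_le_iff (x :: xs) 0 0 x A).mp (le_refl A)).1
    have hhi : A ≤ xs.foldl max x := (pvKey x xs _).mp (pvStop_feasible x xs)
    exact pvBSearch_eq (x :: xs) A (fun m => pvKey x xs m) _ x (xs.foldl max x)
      (by omega) hlo hhi
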